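-- pv_equiv track=rewrite | github.com/muckypaws/defb_generator | DEFB_GeneratorV3.py | mirror_sprite_bytes
-- ===== SOURCE A (Python) =====
-- def reverse_bits(byte):
--     """Reverse the bits of a single byte using bit manipulation."""
--     byte = (byte & 0xF0) >> 4 | (byte & 0x0F) << 4
--     byte = (byte & 0xCC) >> 2 | (byte & 0x33) << 2
--     byte = (byte & 0xAA) >> 1 | (byte & 0x55) << 1
--     return byte
--
-- def mirror_sprite_bytes(sprite_bytes, bytes_per_row, mirror_align):
--     """
--     Mirror the sprite horizontally either in-place (bitwise mirror per byte).
--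
--     Or with alignment (bitwise mirror and reverse byte order).
--
--     Args:
--         sprite_bytes (list): The raw sprite byte list.
--         bytes_per_row (int): Number of bytes per row.
--         mirror_align (bool): If True, also reverse the byte order per row.
--
--     Returns:
--         list: Transformed list of bytes.
--     """
--     mirrored = []
--     for i in range(0, len(sprite_bytes), bytes_per_row):
--         row = sprite_bytes[i:i+bytes_per_row]
--         flipped = [reverse_bits(b) for b in row]
--         if mirror_align:
--             flipped = flipped[::-1]
--         mirrored.extend(flipped)
--     return mirrored
-- ===== SOURCE B (Python) =====
-- def reverse_bits(byte):
--     """Reverse the bits of a single byte using bit manipulation."""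
--     byte = (byte & 0xF0) >> 4 | (byte & 0x0F) << 4
--     byte = (byte & 0xCC) >> 2 | (byte & 0x33) << 2
--     byte = (byte & 0xAA) >> 1 | (byte & 0x55) << 1
--     return byte
--
-- def mirror_sprite_bytes(sprite_bytes, bytes_per_row, mirror_align):
--     # Single on-line pass with a column counter: no slicing and no list
--     # reversal anywhere.  Each bit-reversed byte is inserted at the start of
--     # the current row's output segment (row_start), which mirrors the byte
--     # order of a row incrementally as the bytes stream in.
--     out = []
--     row_start = 0
--     col = 0
--     for b in sprite_bytes:
--         if col == 0:
--             row_start = len(out)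
--         if mirror_align:
--             out.insert(row_start, reverse_bits(b))
--         else:
--             out.append(reverse_bits(b))
--         col += 1
--         if col == bytes_per_row:
--             col = 0
--     return out
-- ===== Notes on version B (the rewrite author's own statement) =====
-- stated objective: alternative
-- what changed: B replaces A's per-row slice/map/reverse loop by a single streaming pass with a column counter that inserts each bit-reversed byte at the start of the current row's output segment, so rows come out byte-mirrored with no slicing and no list reversal.
-- outside the precondition, e.g. on mirror_sprite_bytes([1, 2], -2, False): A returns [], B returns [128, 64]; on mirror_sprite_bytes([1, 2], -2, True): A returns [], B returns [64, 128]; on mirror_sprite_bytes([1], 0, False): A raises ValueError, B returns [128]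
import Mathlib
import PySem

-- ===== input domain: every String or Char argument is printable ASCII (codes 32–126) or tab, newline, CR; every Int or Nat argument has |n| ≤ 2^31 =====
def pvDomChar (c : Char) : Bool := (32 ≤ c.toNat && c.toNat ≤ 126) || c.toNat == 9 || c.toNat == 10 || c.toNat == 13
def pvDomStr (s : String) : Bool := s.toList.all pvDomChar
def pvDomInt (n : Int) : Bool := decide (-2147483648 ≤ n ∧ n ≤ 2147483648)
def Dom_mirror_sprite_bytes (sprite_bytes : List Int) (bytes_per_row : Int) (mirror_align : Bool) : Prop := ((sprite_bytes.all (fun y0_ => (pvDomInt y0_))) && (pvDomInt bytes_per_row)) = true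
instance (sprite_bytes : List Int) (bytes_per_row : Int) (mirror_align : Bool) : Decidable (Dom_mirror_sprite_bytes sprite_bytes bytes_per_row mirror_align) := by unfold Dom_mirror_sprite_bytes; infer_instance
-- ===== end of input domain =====

-- B streams the bytes once, inserting each bit-reversed byte at the start of the current
-- row's output segment (tracked by a column counter), instead of A's per-row
-- slice/map/reverse loop; equal output for every bytes_per_row ≥ 1.

-- ===== PORT A =====
-- shared helper (identical source in Source A and Source B); Python & | >> << are PySem.Int.band/bor and Lean's <<< >>>
def reverse_bits (byte : Int) : Int :=
  let b1 := PySem.Int.bor ((PySem.Int.band byte 0xF0) >>> 4) ((PySem.Int.band byte 0x0F) <<< 4)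
  let b2 := PySem.Int.bor ((PySem.Int.band b1 0xCC) >>> 2) ((PySem.Int.band b1 0x33) <<< 2)
  PySem.Int.bor ((PySem.Int.band b2 0xAA) >>> 1) ((PySem.Int.band b2 0x55) <<< 1)

def mirror_sprite_bytes (sprite_bytes : List Int) (bytes_per_row : Int) (mirror_align : Bool) : List Int :=
  (PySem.List.pyRange 0 (PySem.List.len sprite_bytes) bytes_per_row).foldl
    (fun mirrored i =>
      let row := PySem.List.slice sprite_bytes (some i) (some (i + bytes_per_row))
      let flipped := row.map reverse_bits
      let flipped := if mirror_align then flipped.reverse else flipped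
      mirrored ++ flipped) []

-- ===== PORT B =====
-- state (out, row_start, col); Python list.insert at row_start (always in range here) is PySem.List.insert
def mirror_sprite_bytes_alt (sprite_bytes : List Int) (bytes_per_row : Int) (mirror_align : Bool) : List Int :=
  (sprite_bytes.foldl
    (fun (st : List Int × Int × Int) b =>
      let out := st.1
      let row_start := if st.2.2 = 0 then (out.length : Int) else st.2.1
      let out := if mirror_align then PySem.List.insert out row_start (reverse_bits b)
                 else out ++ [reverse_bits b]
      let col := st.2.2 + 1
      let col := if col = bytes_per_row then 0 else col
      (out, row_start, col))
    ([], 0, 0)).1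

-- ===== PRECONDITION & SPEC =====
-- Pre_ excludes bytes_per_row = 0, where A raises ValueError (range() step must not be zero),
-- and bytes_per_row < 0, where A's empty result is an accident of an empty range while B's
-- one-pass treats the input as a single unterminated row.
def Pre_mirror_sprite_bytes (sprite_bytes : List Int) (bytes_per_row : Int) (mirror_align : Bool) : Prop :=
  1 ≤ bytes_per_row
instance (sprite_bytes : List Int) (bytes_per_row : Int) (mirror_align : Bool) : Decidable (Pre_mirror_sprite_bytes sprite_bytes bytes_per_row mirror_align) := by unfold Pre_mirror_sprite_bytes; infer_instance

def pvWitness_mirror_sprite_bytes : List Int × Int × Bool := ([1, 128, 2, 64], 2, true)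

def Spec_mirror_sprite_bytes (sprite_bytes : List Int) (bytes_per_row : Int) (mirror_align : Bool) (out : List Int) : Prop := out = mirror_sprite_bytes_alt sprite_bytes bytes_per_row mirror_align
instance (sprite_bytes : List Int) (bytes_per_row : Int) (mirror_align : Bool) (out : List Int) : Decidable (Spec_mirror_sprite_bytes sprite_bytes bytes_per_row mirror_align out) := by unfold Spec_mirror_sprite_bytes; infer_instance

-- ===== CLAIM (what is proved, stated in full; the proofs are below) =====
def Claim_equal_mirror_sprite_bytes : Prop := ∀ (sprite_bytes : List Int) (bytes_per_row : Int) (mirror_align : Bool), Dom_mirror_sprite_bytes sprite_bytes bytes_per_row mirror_align → Pre_mirror_sprite_bytes sprite_bytes bytes_per_row mirror_align → Spec_mirror_sprite_bytes sprite_bytes bytes_per_row mirror_align (mirror_sprite_bytes sprite_bytes bytes_per_row mirror_align)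

-- ===== LEMMAS AND PROOFS =====

-- both programs compute the concatenation of g over the bytes_per_row-chunks of the
-- flipped list: g = reverse (mirror_align) or id; s+1 is the chunk width
def chunksG (g : List Int → List Int) (s : Nat) : List Int → List Int
  | [] => []
  | x :: xs => g ((x :: xs).take (s + 1)) ++ chunksG g s ((x :: xs).drop (s + 1))
termination_by l => l.length
decreasing_by simp only [List.length_drop, List.length_cons]; omega

lemma chunksG_nil (g : List Int → List Int) (s : Nat) : chunksG g s [] = [] := by rw [chunksG]

lemma chunksG_cons (g : List Int → List Int) (s : Nat) (x : Int) (xs : List Int) :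
    chunksG g s (x :: xs) = g ((x :: xs).take (s + 1)) ++ chunksG g s ((x :: xs).drop (s + 1)) := by
  rw [chunksG]

lemma pyRange_pos_nil {a b s : Int} (hs : 0 < s) (hab : b ≤ a) : PySem.List.pyRange a b s = [] := by
  rw [PySem.List.pyRange_of_pos a b hs]
  simp [Int.not_lt.mpr hab]

lemma pyRange_pos_cons {a b s : Int} (hs : 0 < s) (hab : a < b) :
    PySem.List.pyRange a b s = a :: PySem.List.pyRange (a + s) b s := by
  rw [PySem.List.pyRange_of_pos a b hs, PySem.List.pyRange_of_pos (a + s) b hs]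
  by_cases h2 : a + s < b
  · rw [if_pos hab, if_pos h2]
    have hstep : (b - a + s - 1) / s = (b - (a + s) + s - 1) / s + 1 := by
      have h : b - a + s - 1 = (b - (a + s) + s - 1) + 1 * s := by ring
      rw [h, Int.add_mul_ediv_right _ _ (by omega : s ≠ 0)]
    have h0 : 0 ≤ (b - (a + s) + s - 1) / s := Int.ediv_nonneg (by omega) (by omega)
    have hm : ((b - a + s - 1) / s).toNat = ((b - (a + s) + s - 1) / s).toNat + 1 := by
      rw [hstep]; omega
    rw [hm, List.range_succ_eq_map, List.map_cons]
    refine List.cons_eq_cons.mpr ⟨by simp, ?_⟩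
    rw [List.map_map]
    apply List.map_congr_left
    intro k _
    simp [Function.comp]
    ring
  · rw [if_pos hab, if_neg h2]
    have hr : b - a + s - 1 = (b - a - 1) + 1 * s := by ring
    have h1 : (b - a + s - 1) / s = 1 := by
      rw [hr, Int.add_mul_ediv_right _ _ (by omega : s ≠ 0),
        Int.ediv_eq_zero_of_lt (by omega) (by omega)]
      omega
    rw [h1]
    simp

lemma slice_take_of_append (pre ys : List Int) (s : Int) (hs : 0 < s) :
    PySem.List.slice (pre ++ ys) (some (pre.length : Int)) (some ((pre.length : Int) + s))
      = ys.take s.toNat := by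
  have h : (pre.length : Int) + s = (pre.length : Int) + (s.toNat : Int) := by omega
  rw [h, PySem.List.slice_natCast_add, List.drop_left]

lemma flatMap_chunksG (g : List Int → List Int) {s : Int} (hs : 0 < s) :
    ∀ (n : Nat) (ys pre : List Int), ys.length = n →
    (PySem.List.pyRange (pre.length : Int) ((pre.length : Int) + (ys.length : Int)) s).flatMap
      (fun i => g (PySem.List.slice (pre ++ ys) (some i) (some (i + s)))) = chunksG g (s - 1).toNat ys := by
  intro n
  induction n using Nat.strong_induction_on with
  | _ n ih =>
    intro ys pre hlen
    have hsucc : (s - 1).toNat + 1 = s.toNat := by omega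
    match ys with
    | [] =>
      rw [pyRange_pos_nil hs (by simp)]
      simp [chunksG_nil]
    | y :: ys' =>
      set ys := y :: ys' with hys
      have hpos : 0 < ys.length := by simp [hys]
      have hlt : (pre.length : Int) < (pre.length : Int) + (ys.length : Int) := by omega
      rw [pyRange_pos_cons hs hlt, List.flatMap_cons, slice_take_of_append pre ys s hs]
      rw [show chunksG g (s - 1).toNat ys = g (ys.take ((s-1).toNat + 1)) ++ chunksG g (s-1).toNat (ys.drop ((s-1).toNat + 1)) from by rw [hys, chunksG_cons]]
      rw [hsucc]
      by_cases hbig : ys.length ≤ s.toNat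
      · rw [pyRange_pos_nil hs (by omega)]
        simp [List.drop_of_length_le hbig, chunksG_nil]
      · have hrw : pre ++ ys = (pre ++ ys.take s.toNat) ++ ys.drop s.toNat := by
          rw [List.append_assoc, List.take_append_drop]
        have h1 : (pre.length : Int) + s = ((pre ++ ys.take s.toNat).length : Int) := by
          simp [List.length_take]
          omega
        have h2 : (pre.length : Int) + (ys.length : Int)
            = ((pre ++ ys.take s.toNat).length : Int) + ((ys.drop s.toNat).length : Int) := by
          simp [List.length_take, List.length_drop]
          omega
        have hd : (ys.drop s.toNat).length < n := by
          rw [← hlen]; simp [List.length_drop]; omega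
        rw [hrw, h1, h2, ih (ys.drop s.toNat).length hd (ys.drop s.toNat) (pre ++ ys.take s.toNat) rfl]

lemma slice_map_comm (f : Int → Int) (xs : List Int) (i s : Int) (hi : 0 ≤ i) (hs : 0 < s) :
    PySem.List.slice (xs.map f) (some i) (some (i + s))
      = (PySem.List.slice xs (some i) (some (i + s))).map f := by
  rw [PySem.List.slice_toNat _ hi (by omega), PySem.List.slice_toNat _ hi (by omega)]
  simp [List.map_take, List.map_drop]

lemma chunksG_id (s : Nat) : ∀ (n : Nat) (ys : List Int), ys.length = n → chunksG id s ys = ys := by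
  intro n
  induction n using Nat.strong_induction_on with
  | _ n ih =>
    intro ys hlen
    match ys with
    | [] => simp [chunksG_nil]
    | y :: ys' =>
      rw [chunksG_cons]
      rw [ih ((y :: ys').drop (s+1)).length (by simp only [List.length_drop, List.length_cons] at hlen ⊢; omega) _ rfl]
      simp [List.take_append_drop]

-- B's fold step, named for the invariant lemmas
def stepB (bpr : Int) (ma : Bool) (st : List Int × Int × Int) (b : Int) : List Int × Int × Int :=
  let out := st.1
  let row_start := if st.2.2 = 0 then (out.length : Int) else st.2.1
  let out := if ma then PySem.List.insert out row_start (reverse_bits b)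
             else out ++ [reverse_bits b]
  let col := st.2.2 + 1
  let col := if col = bpr then 0 else col
  (out, row_start, col)

lemma alt_eq_foldl_stepB (sb : List Int) (bpr : Int) (ma : Bool) :
    mirror_sprite_bytes_alt sb bpr ma = (sb.foldl (stepB bpr ma) ([], 0, 0)).1 := rfl

-- append path: with mirror_align off the fold just maps reverse_bits over the input
lemma foldB_false (bpr : Int) :
    ∀ (sb : List Int) (out : List Int) (rs col : Int),
      (sb.foldl (stepB bpr false) (out, rs, col)).1 = out ++ sb.map reverse_bits := by
  intro sb
  induction sb with
  | nil => intro out rs col; simp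
  | cons x xs ih =>
    intro out rs col
    rw [List.foldl_cons, show stepB bpr false (out, rs, col) x
      = (out ++ [reverse_bits x], if col = 0 then (out.length : Int) else rs,
         if col + 1 = bpr then 0 else col + 1) from rfl, ih]
    simp

-- insert path, within a row: col ≥ 1 and the row fits before the next reset
lemma foldB_row (bpr : Int) (hb : 1 ≤ bpr) :
    ∀ (row : List Int) (out0 acc : List Int) (c : Int),
      c = (acc.length : Int) → 1 ≤ c → c < bpr → c + row.length ≤ bpr →
      List.foldl (stepB bpr true) (out0 ++ acc, (out0.length : Int), c) row
        = (out0 ++ ((row.map reverse_bits).reverse ++ acc), (out0.length : Int),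
           if c + row.length = bpr then 0 else c + row.length) := by
  intro row
  induction row with
  | nil =>
    intro out0 acc c hc h1 hlt hle
    simp only [List.foldl_nil, List.map_nil, List.reverse_nil, List.nil_append, List.length_nil,
      Nat.cast_zero, add_zero]
    rw [if_neg (by omega : ¬ c = bpr)]
  | cons x rest ih =>
    intro out0 acc c hc h1 hlt hle
    rw [List.foldl_cons]
    have hins : stepB bpr true (out0 ++ acc, (out0.length : Int), c) x
        = (out0 ++ (reverse_bits x :: acc), (out0.length : Int),
           if c + 1 = bpr then 0 else c + 1) := by
      simp only [stepB, if_neg (by omega : ¬ c = 0)]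
      rw [PySem.List.insert_natCast (out0 ++ acc) out0.length (reverse_bits x) (by simp),
        List.take_left, List.drop_left]
      simp
    rw [hins]
    by_cases hend : c + 1 = bpr
    · have hrest : rest = [] := by
        have : rest.length = 0 := by simp at hle; omega
        exact List.eq_nil_of_length_eq_zero this
      subst hrest
      rw [if_pos hend, List.foldl_nil]
      rw [show c + (([x] : List Int).length : Int) = c + 1 from by simp]
      rw [if_pos hend]
      simp
    · rw [if_neg hend,
        ih out0 (reverse_bits x :: acc) (c + 1)
          (by simp only [List.length_cons]; omega) (by omega) (by omega)
          (by simp only [List.length_cons] at hle ⊢; push_cast at hle ⊢; omega)]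
      have harr : ((x :: rest).map reverse_bits).reverse ++ acc
          = (rest.map reverse_bits).reverse ++ (reverse_bits x :: acc) := by
        simp
      have hcol : c + (((x :: rest) : List Int).length : Int) = c + 1 + (rest.length : Int) := by
        simp only [List.length_cons]; push_cast; ring
      rw [harr, hcol]

-- insert path, chunk by chunk from a row boundary (col = 0)
lemma foldB_true (bpr : Int) (hb : 1 ≤ bpr) :
    ∀ (n : Nat) (ys out : List Int) (rs : Int), ys.length = n →
      (ys.foldl (stepB bpr true) (out, rs, 0)).1
        = out ++ chunksG List.reverse (bpr - 1).toNat (ys.map reverse_bits) := by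
  intro n
  induction n using Nat.strong_induction_on with
  | _ n ih =>
    intro ys out rs hlen
    match ys with
    | [] => simp [chunksG_nil]
    | x :: tail =>
      have hsucc : (bpr - 1).toNat + 1 = bpr.toNat := by omega
      rw [List.foldl_cons]
      have hfirst : stepB bpr true (out, rs, 0) x
          = (out ++ [reverse_bits x], (out.length : Int), if (1:Int) = bpr then 0 else 1) := by
        simp only [stepB, if_true, zero_add]
        rw [show ((out.length : Nat) : Int) = ((out.length : Nat) : Int) from rfl,
          PySem.List.insert_natCast out out.length (reverse_bits x) (le_refl _)]
        simp
      rw [hfirst]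
      have hchunk : chunksG List.reverse (bpr - 1).toNat ((x :: tail).map reverse_bits)
          = (((x :: tail).map reverse_bits).take bpr.toNat).reverse
            ++ chunksG List.reverse (bpr - 1).toNat (((x :: tail).map reverse_bits).drop bpr.toNat) := by
        rw [show ((x :: tail).map reverse_bits) = reverse_bits x :: tail.map reverse_bits from rfl]
        rw [chunksG_cons, hsucc]
      by_cases hone : (1:Int) = bpr
      · -- bytes_per_row = 1: every byte closes its row immediately
        rw [if_pos hone,
          ih tail.length (by simp [← hlen]) tail (out ++ [reverse_bits x]) (out.length : Int) rfl]
        rw [hchunk]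
        have hb1 : bpr.toNat = 1 := by omega
        simp [hb1]
      · rw [if_neg hone]
        -- split the tail at the end of the first row
        have hsplit : tail = tail.take ((bpr - 1).toNat) ++ tail.drop ((bpr - 1).toNat) :=
          (List.take_append_drop _ _).symm
        conv_lhs => rw [hsplit]
        rw [List.foldl_append]
        have hrow := foldB_row bpr hb (tail.take ((bpr - 1).toNat)) out [reverse_bits x] 1
          (by simp) (le_refl _) (by omega)
          (by simp only [List.length_take]; omega)
        rw [hrow]
        by_cases hfull : (bpr - 1).toNat ≤ tail.length
        · have hlt : (1:Int) + ((tail.take ((bpr-1).toNat)).length : Int) = bpr := by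
            simp only [List.length_take]
            omega
          rw [if_pos hlt,
            ih (tail.drop ((bpr-1).toNat)).length
              (by simp only [List.length_drop]; simp only [List.length_cons] at hlen; omega)
              _ _ (out.length : Int) rfl]
          rw [hchunk]
          simp only [List.append_assoc]
          congr 1
          rw [show ((x :: tail).map reverse_bits) = reverse_bits x :: tail.map reverse_bits from rfl]
          rw [show (reverse_bits x :: tail.map reverse_bits).take bpr.toNat
            = reverse_bits x :: (tail.map reverse_bits).take ((bpr-1).toNat) from by
              rw [← hsucc]; simp]
          rw [show (reverse_bits x :: tail.map reverse_bits).drop bpr.toNat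
            = (tail.map reverse_bits).drop ((bpr-1).toNat) from by rw [← hsucc]; simp]
          simp [List.map_take, List.map_drop, List.append_assoc]
        · -- the input ends inside the first row
          rw [not_le] at hfull
          have htt : tail.take ((bpr-1).toNat) = tail := List.take_of_length_le (le_of_lt hfull)
          have htd : tail.drop ((bpr-1).toNat) = [] := List.drop_eq_nil_of_le (le_of_lt hfull)
          rw [if_neg (show ¬ ((1:Int) + ((tail.take ((bpr-1).toNat)).length : Int) = bpr) from by
            rw [htt]; intro h; omega)]
          rw [hchunk]
          have hdropnil : ((x :: tail).map reverse_bits).drop bpr.toNat = [] := by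
            apply List.drop_eq_nil_of_le
            simp only [List.length_map, List.length_cons]
            omega
          rw [hdropnil, chunksG_nil, List.append_nil]
          have htake : ((x :: tail).map reverse_bits).take bpr.toNat = (x :: tail).map reverse_bits := by
            apply List.take_of_length_le
            simp only [List.length_map, List.length_cons]
            omega
          rw [htake, htt, htd, List.foldl_nil]
          simp

-- A as a flatMap of chunk functions over the flipped list
lemma A_eq_chunksG (sb : List Int) (bpr : Int) (ma : Bool) (hb : 1 ≤ bpr) :
    mirror_sprite_bytes sb bpr ma
      = chunksG (if ma then List.reverse else id) (bpr - 1).toNat (sb.map reverse_bits) := by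
  have hbpos : (0:Int) < bpr := by omega
  unfold mirror_sprite_bytes
  rw [PySem.List.foldl_congr_mem _ _
    (fun (acc : List Int) (i : Int) =>
      acc ++ (if ma then List.reverse else id)
        (PySem.List.slice (sb.map reverse_bits) (some i) (some (i + bpr)))) []
    (by
      intro acc i hi
      have h0 : 0 ≤ i := ((PySem.List.mem_pyRange_iff_of_pos hbpos i).1 hi).1
      cases ma <;> simp [slice_map_comm reverse_bits sb i bpr h0 hbpos])]
  rw [PySem.List.foldl_append_eq_flatMap]
  have := flatMap_chunksG (if ma then List.reverse else id) hbpos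
    (sb.map reverse_bits).length (sb.map reverse_bits) [] rfl
  simp only [List.length_nil, Nat.cast_zero, List.nil_append, zero_add, List.length_map] at this ⊢
  simp only [PySem.List.len_eq]
  simpa using this

-- ===== VERDICT (by name: the statement is the Claim_ definition above) =====
theorem mirror_sprite_bytes_spec : Claim_equal_mirror_sprite_bytes := by
  intro sb bpr ma _ hpre
  unfold Spec_mirror_sprite_bytes
  have hb : (1:Int) ≤ bpr := hpre
  rw [A_eq_chunksG sb bpr ma hb, alt_eq_foldl_stepB]
  cases ma with
  | false =>
    rw [foldB_false bpr sb [] 0 0]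
    have hid : chunksG id ((bpr - 1).toNat) (sb.map reverse_bits) = sb.map reverse_bits :=
      chunksG_id _ (sb.map reverse_bits).length _ rfl
    simpa using hid
  | true =>
    rw [foldB_true bpr hb sb.length sb [] 0 rfl]
    simp
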